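-- pv_equiv track=rewrite | github.com/mutjin08/programmers | ch12_구현/72117_괄호 변환.py | solution
-- ===== SOURCE A (Python) =====
-- def make_balanced(target):
--     l, r = 0, 0
--     for i in range(len(target)):
--         if target[i]=="(":
--             l+=1
--         elif target[i]==")":
--             r+=1
--         if l==r:
--             return target[:i+1], target[i+1:]
--
--     return target, ""
--
-- def is_balanced(target):
--     # 예외처리
--     if len(target)%2!=0:
--         return False
--
--     if target.count('(')==target.count(')'):
--         return True
--     return False
--
-- def is_correct(target):
--     # 예외처리
--     if target[0]==")" or target[-1]=="(":
--         return False
--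
--     if not is_balanced(target):
--         return False
--
--     cnt = 0
--     for c in target:
--         if c=="(":
--             cnt += 1
--         elif c==")":
--             if cnt<1:
--                 return False
--             elif cnt>=1:
--                 cnt -= 1
--     if cnt>0:
--         return False
--     return True
--
-- def solution(w):
--     if len(w)==0:
--         return ""
--     u, v = make_balanced(w)
--     if is_correct(u):
--         return u+solution(v)
--
--     u = "".join(reversed(u[1:len(u)-1]))
--     return "("+solution(v)+")"+u
-- ===== SOURCE B (Python) =====
-- def make_balanced(target):
--     acc = []
--     rest = list(target)
--     bal = 0
--     while rest:
--         c = rest.pop(0)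
--         acc.append(c)
--         if c == '(':
--             bal += 1
--         elif c == ')':
--             bal -= 1
--         if bal == 0:
--             return ''.join(acc), ''.join(rest)
--     return target, ""
--
-- def is_correct(t):
--     if len(t) % 2 != 0 or t[0] == ')' or t[-1] == '(':
--         return False
--     bal = 0
--     mn = 0
--     for c in t:
--         if c == '(':
--             bal += 1
--         elif c == ')':
--             bal -= 1
--         if bal < mn:
--             mn = bal
--     return mn >= 0 and bal == 0
--
-- def solution(w):
--     # phase 1: split w into its full list of minimal balanced chunks
--     chunks = []
--     rest = w
--     while rest:
--         u, rest = make_balanced(rest)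
--         chunks.append(u)
--     # phase 2: fold the chunks right-to-left with a string accumulator
--     result = ""
--     for u in reversed(chunks):
--         if is_correct(u):
--             result = u + result
--         else:
--             result = "(" + result + ")" + "".join(reversed(u[1:len(u)-1]))
--     return result
-- ===== Notes on version B (the rewrite author's own statement) =====
-- stated objective: alternative
-- what changed: Replaced A's self-recursion by a two-phase iteration (splitting pass collecting all balanced chunks, then a right-to-left fold with a string accumulator) and re-implemented the helpers: make_balanced consumes the string into an accumulator with a single signed balance counter instead of indexed slicing with two counters, and is_correct is one fold tracking (balance, running minimum) instead of A's is_balanced count pass plus an early-exit counter loop.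
import Mathlib
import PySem

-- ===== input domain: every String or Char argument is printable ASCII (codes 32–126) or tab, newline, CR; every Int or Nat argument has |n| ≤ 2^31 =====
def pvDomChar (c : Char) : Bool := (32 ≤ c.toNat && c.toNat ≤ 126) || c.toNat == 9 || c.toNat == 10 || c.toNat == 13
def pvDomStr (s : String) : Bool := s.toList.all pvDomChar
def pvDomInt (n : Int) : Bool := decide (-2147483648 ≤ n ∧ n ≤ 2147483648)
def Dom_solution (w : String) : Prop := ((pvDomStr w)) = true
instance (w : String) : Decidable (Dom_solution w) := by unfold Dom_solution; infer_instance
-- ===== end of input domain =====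

-- B replaces A's self-recursion by a splitting pass + right-to-left fold, and
-- re-implements the helpers (balance-counter splitter; one (balance, min) fold
-- for correctness) — objective: alternative.

-- ===== PORT A =====
-- 'for i in range(len(target))' with counters l, r and early return; ported as a
-- structural walk over the remaining suffix, keeping the index i for the slices
def mbLoop (target : List Char) : List Char → Nat → Nat → Nat → List Char × List Char
  | [], _, _, _ => (target, [])
  | c :: rest, i, l, r =>
    let l' := if c = '(' then l + 1 else l
    let r' := if ¬ c = '(' ∧ c = ')' then r + 1 else r
    if l' = r' then (target.take (i + 1), target.drop (i + 1))
    else mbLoop target rest (i + 1) l' r'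

def make_balanced (target : List Char) : List Char × List Char := mbLoop target target 0 0 0

def is_balanced (t : List Char) : Bool :=
  if t.length % 2 ≠ 0 then false
  else t.count '(' == t.count ')'

-- the 'cnt' loop of is_correct, with its early 'return False'
def icLoop : List Char → Nat → Bool
  | [], cnt => cnt == 0
  | c :: rest, cnt =>
    if c = '(' then icLoop rest (cnt + 1)
    else if c = ')' then (if cnt < 1 then false else icLoop rest (cnt - 1))
    else icLoop rest cnt

-- target[0] / target[-1]: both programs only call is_correct on nonempty chunks,
-- where head?/getLast? are exact
def is_correct (t : List Char) : Bool :=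
  if t.head? = some ')' ∨ t.getLast? = some '(' then false
  else if ¬ is_balanced t then false
  else icLoop t 0

-- A's recursion on the remainder v; fuel = |w| only makes totality structural
-- (each chunk is nonempty, so |w| levels always suffice and fuel never runs out)
def solGo : Nat → List Char → List Char
  | 0, _ => []
  | fuel + 1, w =>
    if w = [] then []
    else
      let p := make_balanced w
      if is_correct p.1 then p.1 ++ solGo fuel p.2
      else
        -- "(" + solution(v) + ")" + "".join(reversed(u[1:len(u)-1]))
        -- u[1:len(u)-1] ported by hand as (drop 1).dropLast, exact for every length
        '(' :: (solGo fuel p.2 ++ [')'] ++ ((p.1.drop 1).dropLast).reverse)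

def solution (w : String) : String := String.mk (solGo w.toList.length w.toList)

-- ===== PORT B =====
-- Source B's while-loop: pop chars from the front of rest onto acc with one signed
-- balance counter; acc is built head-first and reversed on return (same value as
-- Python's append-at-end list)
def mbB : List Char → List Char → Int → List Char × List Char
  | acc, [], _ => (acc.reverse, [])      -- Source B returns (target, ""), and here acc holds all of target
  | acc, c :: rest, bal =>
    let bal' := if c = '(' then bal + 1 else if c = ')' then bal - 1 else bal
    if bal' = 0 then ((c :: acc).reverse, rest)
    else mbB (c :: acc) rest bal'

def make_balanced_b (target : List Char) : List Char × List Char := mbB [] target 0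

-- Source B's single for-loop of is_correct: (balance, running minimum)
def icFold (t : List Char) (bal mn : Int) : Int × Int :=
  t.foldl (fun p c =>
    let b := if c = '(' then p.1 + 1 else if c = ')' then p.1 - 1 else p.1
    (b, if b < p.2 then b else p.2)) (bal, mn)

def is_correct_b (t : List Char) : Bool :=
  if t.length % 2 ≠ 0 ∨ t.head? = some ')' ∨ t.getLast? = some '(' then false
  else
    let r := icFold t 0 0
    decide (0 ≤ r.2) && decide (r.1 = 0)

-- phase 1: the full list of minimal balanced chunks of w (fuel = |w| for totality;
-- every chunk is nonempty so it never runs out)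
def splitChunks : Nat → List Char → List (List Char)
  | 0, _ => []
  | fuel + 1, w =>
    if w = [] then []
    else
      let p := make_balanced_b w
      p.1 :: splitChunks fuel p.2

-- body of Source B's 'for u in reversed(chunks)' loop
def chunkStep (result u : List Char) : List Char :=
  if is_correct_b u then u ++ result
  else '(' :: (result ++ [')'] ++ ((u.drop 1).dropLast).reverse)

def solution_alt (w : String) : String :=
  String.mk (((splitChunks w.toList.length w.toList).reverse).foldl chunkStep [])

-- ===== PRECONDITION & SPEC =====
def Spec_solution (w : String) (out : String) : Prop := out = solution_alt w
instance (w : String) (out : String) : Decidable (Spec_solution w out) := by unfold Spec_solution; infer_instance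

-- ===== CLAIM (what is proved, stated in full; the proofs are below) =====
def Claim_equal_solution : Prop := ∀ (w : String), Dom_solution w → Spec_solution w (solution w)

-- ===== LEMMAS AND PROOFS =====

-- B's splitter equals A's: invariant target = acc.reverse ++ rest, i = |acc|, bal = l - r
theorem mb_eq (rest : List Char) : ∀ (acc : List Char) (l r : Nat),
    mbB acc rest ((l : Int) - (r : Int)) = mbLoop (acc.reverse ++ rest) rest acc.length l r := by
  induction rest with
  | nil => intro acc l r; simp [mbB, mbLoop]
  | cons c rest ih =>
    intro acc l r
    have hlen : acc.reverse.length = acc.length := List.length_reverse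
    have htake : (acc.reverse ++ c :: rest).take (acc.length + 1) = acc.reverse ++ [c] := by
      rw [← hlen]; simp [List.take_append]
    have hdrop : (acc.reverse ++ c :: rest).drop (acc.length + 1) = rest := by
      rw [← hlen]; simp [List.drop_append]
    simp only [mbB, mbLoop, htake, hdrop]
    have hrec : ∀ l' r' : Nat,
        mbB (c :: acc) rest ((l' : Int) - (r' : Int)) =
          mbLoop (acc.reverse ++ c :: rest) rest (acc.length + 1) l' r' := by
      intro l' r'
      have := ih (c :: acc) l' r'
      simpa using this
    by_cases hc : c = '('
    · simp only [hc, reduceIte, Char.reduceEq, false_and, not_true]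
      by_cases h : l + 1 = r
      · rw [if_pos (by omega : (l : Int) - r + 1 = 0), if_pos (by omega : l + 1 = r)]
        simp
      · rw [if_neg (by omega : ¬ (l : Int) - r + 1 = 0), if_neg (by omega : ¬ l + 1 = r)]
        have hx := hrec (l + 1) r
        rw [hc] at hx
        rw [show (l : Int) - r + 1 = ((l + 1 : Nat) : Int) - r by push_cast; ring]
        exact hx
    · by_cases hc' : c = ')'
      · simp only [hc', Char.reduceEq, reduceIte, not_false_iff, true_and]
        by_cases h : l = r + 1
        · rw [if_pos (by omega : (l : Int) - r - 1 = 0), if_pos (by omega : l = r + 1)]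
          simp
        · rw [if_neg (by omega : ¬ (l : Int) - r - 1 = 0), if_neg (by omega : ¬ l = r + 1)]
          have hx := hrec l (r + 1)
          rw [hc'] at hx
          rw [show (l : Int) - r - 1 = (l : Int) - ((r + 1 : Nat) : Int) by push_cast; ring]
          exact hx
      · simp only [if_neg hc, hc', and_false, reduceIte]
        by_cases h : l = r
        · rw [if_pos (by omega : (l : Int) - r = 0), if_pos h]
          simp
        · rw [if_neg (by omega : ¬ (l : Int) - r = 0), if_neg h]
          exact hrec l r

theorem make_balanced_eq (t : List Char) : make_balanced_b t = make_balanced t := by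
  have := mb_eq t [] 0 0
  simpa [make_balanced_b, make_balanced] using this

-- one step of Source B's is_correct fold, in icFold form on both sides
theorem icFold_cons (c : Char) (t : List Char) (b m : Int) :
    icFold (c :: t) b m =
      icFold t (if c = '(' then b + 1 else if c = ')' then b - 1 else b)
        (if (if c = '(' then b + 1 else if c = ')' then b - 1 else b) < m
         then (if c = '(' then b + 1 else if c = ')' then b - 1 else b) else m) := rfl

-- the fold's running minimum never increases
theorem icFold_mn_le (t : List Char) : ∀ (b m : Int), (icFold t b m).2 ≤ m := by
  induction t with
  | nil => intro b m; simp [icFold]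
  | cons c t ih =>
    intro b m
    rw [icFold_cons]
    exact le_trans (ih _ _) (by split <;> omega)

-- the fold's final balance is the initial one plus the paren-count difference
theorem icFold_bal (t : List Char) : ∀ (b m : Int),
    (icFold t b m).1 = b + (t.count '(' : Int) - (t.count ')' : Int) := by
  induction t with
  | nil => intro b m; simp [icFold]
  | cons c t ih =>
    intro b m
    rw [icFold_cons, ih]
    by_cases hc : c = '('
    · simp [hc]; ring
    · by_cases hc' : c = ')'
      · simp [hc']; ring
      · simp [hc, hc']

-- A's early-exit counter loop equals B's (balance, min) fold test
theorem icLoop_eq (t : List Char) : ∀ (c : Nat) (m : Int), 0 ≤ m →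
    icLoop t c = (decide (0 ≤ (icFold t (c : Int) m).2) && decide ((icFold t (c : Int) m).1 = 0)) := by
  induction t with
  | nil =>
    intro c m hm
    by_cases h : c = 0 <;> simp [icLoop, icFold, hm, h]
  | cons ch t ih =>
    intro c m hm
    rw [icLoop, icFold_cons]
    by_cases hc : ch = '('
    · rw [if_pos hc]
      simp only [hc, Char.reduceEq, reduceIte]
      have := ih (c + 1) (if (c : Int) + 1 < m then (c : Int) + 1 else m) (by split <;> omega)
      rw [this]
      norm_num
    · by_cases hc' : ch = ')'
      · rw [if_neg hc, if_pos hc']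
        simp only [hc', Char.reduceEq, reduceIte]
        by_cases h0 : c < 1
        · rw [if_pos h0]
          have hc0 : c = 0 := by omega
          subst hc0
          rw [if_pos (by omega : ((0 : Nat) : Int) - 1 < m)]
          have h01 : ((0 : Nat) : Int) - 1 = -1 := by norm_num
          rw [h01]
          have hneg : ¬ (0 ≤ (icFold t (-1 : Int) (-1)).2) := by
            have hle := icFold_mn_le t (-1) (-1); omega
          simp [hneg]
        · rw [if_neg h0]
          have := ih (c - 1) (if (c : Int) - 1 < m then (c : Int) - 1 else m) (by split <;> omega)
          rw [this]
          have hcast : ((c - 1 : Nat) : Int) = (c : Int) - 1 := by omega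
          rw [hcast]
      · rw [if_neg hc, if_neg hc']
        simp only [hc, hc', reduceIte]
        exact ih c (if (c : Int) < m then (c : Int) else m) (by split <;> omega)

theorem is_correct_eq (t : List Char) : is_correct_b t = is_correct t := by
  rw [is_correct_b, is_correct, is_balanced]
  by_cases hg : t.head? = some ')' ∨ t.getLast? = some '('
  · simp [hg]
  · by_cases hlen : t.length % 2 ≠ 0
    · simp [hg, hlen]
    · rw [icLoop_eq t 0 0 le_rfl]
      have hbal := icFold_bal t 0 0
      by_cases hcnt : t.count '(' = t.count ')'
      · simp [hg, hlen, hcnt]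
      · have hb : ¬ ((icFold t 0 0).1 = 0) := by
          rw [hbal]; omega
        simp [hg, hlen, hcnt, hb]

theorem solGo_eq (fuel : Nat) (w : List Char) :
    solGo fuel w = ((splitChunks fuel w).reverse).foldl chunkStep [] := by
  induction fuel generalizing w with
  | zero => simp [solGo, splitChunks]
  | succ fuel ih =>
    rw [solGo, splitChunks]
    by_cases hw : w = []
    · simp [hw]
    · simp only [if_neg hw]
      rw [make_balanced_eq]
      rw [List.reverse_cons, List.foldl_append, ← ih]
      simp [chunkStep, is_correct_eq]

-- ===== VERDICT (by name: the statement is the Claim_ definition above) =====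
theorem solution_spec : Claim_equal_solution := by
  intro w _
  unfold Spec_solution solution solution_alt
  rw [solGo_eq]
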